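-- pv_equiv track=rewrite | github.com/rikthi/surgery-summarizer-hack4health | backend/phase_video_split.py | group_segments
-- ===== SOURCE A (Python) =====
-- def group_segments(preds):
--     segments = {}
--     prev_phase = preds[0][1]
--     start = preds[0][0]
--
--     for i in range(1, len(preds)):
--         sec, phase = preds[i]
--         if phase != prev_phase:
--             end = preds[i - 1][0]
--             segments.setdefault(prev_phase, []).append((start, end))
--             prev_phase = phase
--             start = sec
--
--     # Final segment
--     last_sec, last_phase = preds[-1]
--     segments.setdefault(last_phase, []).append((start, last_sec))
--
--     return segments
-- ===== SOURCE B (Python) =====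
-- def group_segments(preds):
--     # Run-detection decomposition: peel off one maximal run of equal phases at a
--     # time, summarize it as (first sec, last sec). Returns {} on empty input
--     # (where the original raises IndexError).
--     segments = {}
--     rest = preds
--     while rest:
--         start, phase = rest[0]
--         k = 1
--         while k < len(rest) and rest[k][1] == phase:
--             k += 1
--         end = rest[k - 1][0]
--         segments.setdefault(phase, []).append((start, end))
--         rest = rest[k:]
--     return segments
-- ===== Notes on version B (the rewrite author's own statement) =====
-- stated objective: alternative
-- what changed: Replaces A's prev_phase/start carry-and-compare index loop with an explicit run-detection decomposition: peel off one maximal run of equal consecutive phases at a time and summarize it as (first sec, last sec); no carried comparison state survives across runs.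
-- crash fix: On the empty list A raises IndexError (it indexes preds[0]); B's run loop simply never executes and returns {}. — e.g. on group_segments([]): A raises IndexError, B returns []
import Mathlib
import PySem

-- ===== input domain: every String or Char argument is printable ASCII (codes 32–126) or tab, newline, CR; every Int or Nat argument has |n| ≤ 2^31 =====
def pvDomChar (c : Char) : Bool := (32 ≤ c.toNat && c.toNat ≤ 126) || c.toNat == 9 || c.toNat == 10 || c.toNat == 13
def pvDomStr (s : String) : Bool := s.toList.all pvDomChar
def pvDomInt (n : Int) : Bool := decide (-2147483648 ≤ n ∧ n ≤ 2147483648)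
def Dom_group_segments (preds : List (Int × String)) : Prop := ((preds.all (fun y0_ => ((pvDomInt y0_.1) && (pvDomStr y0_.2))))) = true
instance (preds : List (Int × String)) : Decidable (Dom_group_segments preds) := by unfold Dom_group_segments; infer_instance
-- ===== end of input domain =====

-- B replaces A's prev_phase/start carry-and-compare loop with a run-detection
-- decomposition (peel off one maximal run of equal consecutive phases, summarize
-- it as (first sec, last sec)); same return value on every nonempty input, and
-- B returns {} on [] where A raises IndexError.

-- shared dict primitive: segments.setdefault(k, []).append(v)
def pvSetdefApp (d : PySem.Dict String (List (Int × Int))) (k : String) (v : Int × Int) :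
    PySem.Dict String (List (Int × Int)) :=
  d.modify k [] (· ++ [v])

-- ===== PORT A =====
-- body of A's 'for i in range(1, len(preds))' loop; state = (segments, prev_phase, start)
def pvAStep (preds : List (Int × String))
    (st : PySem.Dict String (List (Int × Int)) × String × Int) (i : Int) :
    PySem.Dict String (List (Int × Int)) × String × Int :=
  match PySem.List.pyGet? preds i with
  | some q =>  -- sec, phase = preds[i]
      if q.2 ≠ st.2.1 then
        -- end = preds[i - 1][0]  (always in range on this loop's indices)
        let endv := ((PySem.List.pyGet? preds (i - 1)).getD (0, "")).1
        (pvSetdefApp st.1 st.2.1 (st.2.2, endv), q.2, q.1)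
      else st
  | none => st  -- unreachable: range(1, len(preds)) indices never raise

def group_segments (preds : List (Int × String)) : List (String × List (Int × Int)) :=
  match PySem.List.pyGet? preds 0 with
  | none => []  -- preds[0] raises IndexError: excluded by Pre_
  | some p0 =>
    let st0 : PySem.Dict String (List (Int × Int)) × String × Int := (⟨[]⟩, p0.2, p0.1)
    let st := (PySem.List.pyRange 1 (preds.length : Int)).foldl (pvAStep preds) st0
    match PySem.List.pyGet? preds (-1) with
    | none => []  -- unreachable: preds is nonempty here
    | some lastp => (pvSetdefApp st.1 lastp.2 (st.2.2, lastp.1)).items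

-- ===== PORT B =====
-- B's outer while loop: split off the maximal run of rest[0]'s phase.
-- The inner 'k' scan is rendered by takeWhile/dropWhile: rest[1:k] = takeWhile,
-- rest[k:] = dropWhile, rest[k-1] = last element of the run.  The fuel argument
-- (first parameter) only makes the recursion structural: the entry call passes
-- preds.length, which the loop, consuming ≥ 1 element per iteration, never exhausts.
def pvBLoop : Nat → PySem.Dict String (List (Int × Int)) → List (Int × String) →
    PySem.Dict String (List (Int × Int))
  | _, segments, [] => segments
  | 0, segments, _ => segments  -- fuel exhausted: never reached from group_segments_alt
  | fuel + 1, segments, x :: tl =>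
    let run := tl.takeWhile (fun q => q.2 == x.2)   -- start, phase = rest[0]
    let endv := (run.getLastD x).1                  -- end = rest[k - 1][0]
    pvBLoop fuel (pvSetdefApp segments x.2 (x.1, endv)) (tl.dropWhile (fun q => q.2 == x.2))

def group_segments_alt (preds : List (Int × String)) : List (String × List (Int × Int)) :=
  (pvBLoop preds.length ⟨[]⟩ preds).items

-- ===== PRECONDITION & SPEC =====
-- A indexes preds[0]: it raises IndexError exactly on the empty list.
def Pre_group_segments (preds : List (Int × String)) : Prop := preds ≠ []
instance (preds : List (Int × String)) : Decidable (Pre_group_segments preds) := by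
  unfold Pre_group_segments; infer_instance
def pvWitness_group_segments : (List (Int × String)) := [(3, "a"), (5, "a"), (7, "b")]

-- On the empty list A raises IndexError (it indexes preds[0]); B returns {}.
def Raises_group_segments (preds : List (Int × String)) : Prop := preds = []
instance (preds : List (Int × String)) : Decidable (Raises_group_segments preds) := by
  unfold Raises_group_segments; infer_instance
def pvRaiseWitness_group_segments : (List (Int × String)) := []
def pvRaiseWitnessOut_group_segments : List (String × List (Int × Int)) := []

def Spec_group_segments (preds : List (Int × String)) (out : List (String × List (Int × Int))) : Prop := out = group_segments_alt preds
instance (preds : List (Int × String)) (out : List (String × List (Int × Int))) : Decidable (Spec_group_segments preds out) := by unfold Spec_group_segments; infer_instance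

-- ===== CLAIM (what is proved, stated in full; the proofs are below) =====
def Claim_equal_group_segments : Prop := ∀ (preds : List (Int × String)), Dom_group_segments preds → Pre_group_segments preds → Spec_group_segments preds (group_segments preds)
def Claim_raises_group_segments : Prop := (∀ (preds : List (Int × String)), Dom_group_segments preds → Raises_group_segments preds → ¬ Pre_group_segments preds) ∧ (Dom_group_segments (pvRaiseWitness_group_segments) ∧ Raises_group_segments (pvRaiseWitness_group_segments) ∧ group_segments_alt (pvRaiseWitness_group_segments) = pvRaiseWitnessOut_group_segments)

-- ===== LEMMAS AND PROOFS =====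

-- proof-side mid-level recursion: A's loop re-expressed structurally, carrying the
-- previous ELEMENT (its phase is A's prev_phase, its sec is preds[i-1][0])
def pvGoA (d : PySem.Dict String (List (Int × Int))) (prev : Int × String) (start : Int) :
    List (Int × String) → PySem.Dict String (List (Int × Int))
  | [] => pvSetdefApp d prev.2 (start, prev.1)
  | x :: rest =>
      if x.2 = prev.2 then pvGoA d x start rest
      else pvGoA (pvSetdefApp d prev.2 (start, prev.1)) x x.1 rest

-- A's indexed fold plus the final preds[-1] step equals pvGoA on the suffix
theorem pvA_fold_eq_go (preds : List (Int × String)) :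
    ∀ (m k : Nat) (d : PySem.Dict String (List (Int × Int))) (start : Int)
      (h : k < preds.length) (hne : preds ≠ []),
      m = preds.length - (k+1) →
      (let st := (PySem.List.pyRange ((k : Int) + 1) (preds.length : Int)).foldl
                    (pvAStep preds) (d, preds[k].2, start)
       pvSetdefApp st.1 (preds.getLast hne).2 (st.2.2, (preds.getLast hne).1))
      = pvGoA d preds[k] start (preds.drop (k + 1)) := by
  intro m
  induction m with
  | zero =>
    intro k d start h hne hm
    have hr : PySem.List.pyRange ((k : Int) + 1) (preds.length : Int) = [] := by
      simp [PySem.List.pyRange]; omega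
    have hd : preds.drop (k+1) = [] := by simp; omega
    simp only [hr, List.foldl_nil, hd, pvGoA]
    have : preds.getLast hne = preds[k] := by
      rw [List.getLast_eq_getElem]; congr 1; omega
    rw [this]
  | succ m ih =>
    intro k d start h hne hm
    have hk1 : k + 1 < preds.length := by omega
    have hr : PySem.List.pyRange ((k : Int) + 1) (preds.length : Int)
        = ((k : Int) + 1) :: PySem.List.pyRange ((k : Int) + 1 + 1) (preds.length : Int) := by
      exact PySem.List.pyRange_one_cons (by exact_mod_cast by omega)
    have hget : PySem.List.pyGet? preds ((k : Int) + 1) = some preds[k+1] := by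
      have : ((k : Int) + 1) = ((k + 1 : Nat) : Int) := by push_cast; ring
      rw [this, PySem.List.pyGet?_natCast]
      simp [List.getElem?_eq_getElem hk1]
    have hgetp : PySem.List.pyGet? preds ((k : Int) + 1 - 1) = some preds[k] := by
      have : ((k : Int) + 1 - 1) = ((k : Nat) : Int) := by push_cast; ring
      rw [this, PySem.List.pyGet?_natCast]
      simp [List.getElem?_eq_getElem h]
    have hdrop : preds.drop (k+1) = preds[k+1] :: preds.drop (k+2) := by
      rw [List.drop_eq_getElem_cons hk1]
    rw [hr]
    simp only [List.foldl_cons]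
    rw [hdrop]
    have hcast : ((k : Int) + 1 + 1) = (((k+1 : Nat) : Int) + 1) := by norm_cast
    by_cases hph : preds[k+1].2 = preds[k].2
    · have hstep : pvAStep preds (d, preds[k].2, start) ((k : Int) + 1) = (d, preds[k].2, start) := by
        unfold pvAStep; rw [hget]; simp [hph]
      rw [hstep, hcast]
      have hIH := ih (k+1) d start hk1 hne (by omega)
      simp only [pvGoA]
      rw [if_pos hph, ← hph]
      exact hIH
    · have hstep : pvAStep preds (d, preds[k].2, start) ((k : Int) + 1)
          = (pvSetdefApp d preds[k].2 (start, preds[k].1), preds[k+1].2, preds[k+1].1) := by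
        unfold pvAStep; rw [hget, hgetp]; simp [hph]
      rw [hstep, hcast]
      have hIH := ih (k+1) (pvSetdefApp d preds[k].2 (start, preds[k].1)) preds[k+1].1 hk1 hne (by omega)
      simp only [pvGoA]
      rw [if_neg hph]
      exact hIH

-- pvGoA equals B's run loop (any sufficient fuel)
theorem pvGo_eq_b : ∀ (rest : List (Int × String)) (fuel : Nat)
    (d : PySem.Dict String (List (Int × Int))) (s start : Int) (p : String),
    rest.length ≤ fuel →
    pvGoA d (s, p) start rest
      = pvBLoop fuel
          (pvSetdefApp d p (start, ((rest.takeWhile (fun q => q.2 == p)).getLastD (s, p)).1))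
          (rest.dropWhile (fun q => q.2 == p)) := by
  intro rest
  induction rest with
  | nil => intro fuel d s start p hf; cases fuel <;> simp [pvGoA, pvBLoop]
  | cons x tl ih =>
    intro fuel d s start p hf
    by_cases hph : x.2 = p
    · have hb : (x.2 == p) = true := by simp [hph]
      simp only [pvGoA, if_pos hph, List.takeWhile_cons, List.dropWhile_cons, hb, if_true]
      rw [List.getLastD_cons]
      have := ih fuel d x.1 start p (by simp at hf; omega)
      obtain ⟨xs, xp⟩ := x
      simp only at hph
      subst hph
      exact this
    · have hb : (x.2 == p) = false := by simp [hph]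
      simp only [pvGoA, if_neg hph, List.takeWhile_cons, List.dropWhile_cons, hb]
      simp only [List.getLastD_nil, if_false, Bool.false_eq_true]
      obtain ⟨fuel, rfl⟩ : ∃ f, fuel = f + 1 := by
        cases fuel with
        | zero => simp at hf
        | succ f => exact ⟨f, rfl⟩
      rw [pvBLoop]
      have := ih fuel (pvSetdefApp d p (start, s)) x.1 x.1 x.2 (by simp at hf; omega)
      obtain ⟨xs, xp⟩ := x
      exact this

-- ===== VERDICT (by name: the statement is the Claim_ definition above) =====
theorem group_segments_spec : Claim_equal_group_segments := by
  intro preds _ hpre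
  unfold Spec_group_segments
  cases preds with
  | nil => exact absurd rfl hpre
  | cons x tl =>
    have hne : (x :: tl) ≠ [] := by simp
    have h0 : PySem.List.pyGet? (x::tl) 0 = some x := by
      simp [PySem.List.pyGet?, PySem.List.pyIdx?]
    have hlast : PySem.List.pyGet? (x::tl) (-1) = some ((x::tl).getLast hne) := by
      simp [PySem.List.pyGet?, PySem.List.pyIdx?, List.getLast_eq_getElem]
      rfl
    have hA := pvA_fold_eq_go (x::tl) ((x::tl).length - 1) 0 ⟨[]⟩ x.1 (by simp) hne rfl
    simp only [Nat.cast_zero, zero_add, List.getElem_cons_zero, List.drop_one, List.tail_cons] at hA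
    have hB := pvGo_eq_b tl tl.length ⟨[]⟩ x.1 x.1 x.2 le_rfl
    unfold group_segments group_segments_alt
    rw [h0, hlast]
    simp only [List.length_cons] at hA ⊢
    rw [pvBLoop]
    congr 1
    rw [hA]
    obtain ⟨xs, xp⟩ := x
    exact hB

theorem group_segments_raises : Claim_raises_group_segments := by
  unfold Claim_raises_group_segments
  exact ⟨fun preds _ hr hp => hp hr, by decide⟩

-- self-check: the crash-fix value group_segments_raises certifies, at the literal witness
theorem group_segments_raises_witness_ok : group_segments_alt [] = [] :=
  group_segments_raises.2.2.2
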